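-- pv_equiv track=rewrite | github.com/zhang-zzf/algorithm | python/algorithm.py | recursion_sum2
-- ===== SOURCE A (Python) =====
-- def recursion_sum2(lst=[], start=0, stop=0):
--     """
--     采用递归方法求和
--     """
--     if (len(lst) == 0):
--         return 0
--     lng = stop - start
--     if (lng <= 0):
--         return 0
--     elif (lng == 1):
--         return lst[start]
--     return lst[start] + recursion_sum2(lst, start + 1, stop)
-- ===== SOURCE B (Python) =====
-- def recursion_sum2(lst=[], start=0, stop=0):
--     """Iterative accumulator loop over the index range instead of recursion."""
--     if len(lst) == 0:
--         return 0
--     total = 0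
--     for i in range(start, stop):
--         total += lst[i]
--     return total
-- ===== Notes on version B (the rewrite author's own statement) =====
-- stated objective: simpler
-- what changed: Replaced the recursion (one stack frame per element) by a single iterative for-loop over range(start, stop) with an accumulator; same empty-list guard and same element indexing so the raising behaviour is unchanged.
import Mathlib
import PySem

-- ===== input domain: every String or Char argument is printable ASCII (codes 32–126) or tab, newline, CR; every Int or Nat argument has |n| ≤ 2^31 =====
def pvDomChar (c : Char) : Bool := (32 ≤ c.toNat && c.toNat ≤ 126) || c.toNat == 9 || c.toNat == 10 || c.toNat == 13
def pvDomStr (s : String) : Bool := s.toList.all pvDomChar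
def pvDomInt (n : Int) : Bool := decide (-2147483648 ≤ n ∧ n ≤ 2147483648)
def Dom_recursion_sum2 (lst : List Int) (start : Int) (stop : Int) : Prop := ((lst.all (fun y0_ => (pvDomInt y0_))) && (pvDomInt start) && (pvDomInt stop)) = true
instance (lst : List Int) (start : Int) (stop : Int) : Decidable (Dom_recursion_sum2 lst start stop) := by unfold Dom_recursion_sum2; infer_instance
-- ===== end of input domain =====

-- B replaces A's recursion by a single iterative accumulator loop over the index range (simpler: O(1) space, no recursion).


-- ===== PORT A =====
def recursion_sum2 (lst : List Int) (start : Int) (stop : Int) : Int :=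
  if lst.length = 0 then 0
  else
    let lng := stop - start
    if lng ≤ 0 then 0
    else if lng = 1 then (PySem.List.pyGet? lst start).getD 0
    else (PySem.List.pyGet? lst start).getD 0 + recursion_sum2 lst (start + 1) stop
termination_by (stop - start).toNat
decreasing_by omega

-- ===== PORT B =====
def recursion_sum2_alt (lst : List Int) (start : Int) (stop : Int) : Int :=
  if lst.length = 0 then 0
  else (PySem.List.pyRange start stop 1).foldl
        (fun total i => total + (PySem.List.pyGet? lst i).getD 0) 0

-- ===== PRECONDITION & SPEC =====
-- Pre_ excludes exactly the inputs where Python A raises IndexError: a nonempty list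
-- with a nonempty index range [start, stop) not entirely within [-len(lst), len(lst)).
def Pre_recursion_sum2 (lst : List Int) (start : Int) (stop : Int) : Prop :=
  lst = [] ∨ stop ≤ start ∨ (-(lst.length : Int) ≤ start ∧ stop ≤ (lst.length : Int))
instance (lst : List Int) (start : Int) (stop : Int) : Decidable (Pre_recursion_sum2 lst start stop) := by unfold Pre_recursion_sum2; infer_instance

def pvWitness_recursion_sum2 : List Int × Int × Int := ([3, -1, 4, 1], 1, 3)

def Spec_recursion_sum2 (lst : List Int) (start : Int) (stop : Int) (out : Int) : Prop := out = recursion_sum2_alt lst start stop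
instance (lst : List Int) (start : Int) (stop : Int) (out : Int) : Decidable (Spec_recursion_sum2 lst start stop out) := by unfold Spec_recursion_sum2; infer_instance

-- ===== CLAIM (what is proved, stated in full; the proofs are below) =====
def Claim_equal_recursion_sum2 : Prop := ∀ (lst : List Int) (start : Int) (stop : Int), Dom_recursion_sum2 lst start stop → Pre_recursion_sum2 lst start stop → Spec_recursion_sum2 lst start stop (recursion_sum2 lst start stop)

-- ===== LEMMAS AND PROOFS =====

-- A's recursion computes the sum of the per-index values over the range [start, stop).
theorem recursion_sum2_eq_sum (lst : List Int) (h : lst.length ≠ 0) :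
    ∀ (n : Nat) (start stop : Int), (stop - start).toNat = n →
      recursion_sum2 lst start stop
        = ((PySem.List.pyRange start stop 1).map
            (fun i => (PySem.List.pyGet? lst i).getD 0)).sum := by
  intro n
  induction n with
  | zero =>
    intro start stop hn
    rw [recursion_sum2]
    rw [PySem.List.pyRange_one_eq_nil (by omega)]
    simp [h, show stop - start ≤ 0 by omega]
  | succ m ih =>
    intro start stop hn
    rw [recursion_sum2]
    rw [PySem.List.pyRange_one_cons (by omega)]
    by_cases h1 : stop - start = 1
    · rw [PySem.List.pyRange_one_eq_nil (by omega)]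
      simp [h, h1]
    · have : ¬ stop - start ≤ 0 := by omega
      simp only [h, ite_false, if_neg this, if_neg h1, List.map_cons, List.sum_cons]
      rw [ih (start + 1) stop (by omega)]

theorem recursion_sum2_spec' (lst : List Int) (start stop : Int) :
    recursion_sum2 lst start stop = recursion_sum2_alt lst start stop := by
  unfold recursion_sum2_alt
  by_cases h : lst.length = 0
  · rw [recursion_sum2]; simp [h]
  · rw [if_neg h, recursion_sum2_eq_sum lst h (stop - start).toNat start stop rfl,
      PySem.List.foldl_add, zero_add]

-- ===== VERDICT (by name: the statement is the Claim_ definition above) =====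
theorem recursion_sum2_spec : Claim_equal_recursion_sum2 := by
  intro lst start stop _ _
  exact recursion_sum2_spec' lst start stop
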